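-- pv_equiv track=rewrite | github.com/qeedquan/challenges | codegolf/generate-keyboard-friendly-numbers.py | kbf
-- ===== SOURCE A (Python) =====
-- def kbf(n):
--     i = 0
--     while n != 0:
--         i += 1
--         s = str(i)
--         for x in range(len(s) - 1):
--             k = (int(s[x]) + 9) % 10
--             if s[x + 1] not in ' 1234567890'[k : k + 3]:
--                 break
--         else:
--             n -= 1
--     return i
-- ===== SOURCE B (Python) =====
-- # Same nth-number search, but enumerates only the valid numbers, length layer by
-- # length layer, instead of testing every integer: asymptotically faster.
-- def kbf(n):
--     if n == 0:
--         return 0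
--     # successors[d] = digits allowed after digit d (ascending), per the keyboard row 1234567890
--     succ = [[0, 9], [1, 2], [1, 2, 3], [2, 3, 4], [3, 4, 5], [4, 5, 6],
--             [5, 6, 7], [6, 7, 8], [7, 8, 9], [0, 8, 9]]
--     level = [(d, d) for d in range(1, 10)]  # (value, last digit), ascending, one length at a time
--     while n > len(level):
--         n -= len(level)
--         level = [(v * 10 + d, d) for (v, last) in level for d in succ[last]]
--     return level[n - 1][0]
-- ===== Notes on version B (the rewrite author's own statement) =====
-- stated objective: faster
-- what changed: A tests every integer 1,2,3,... with a per-number string/slice digit-adjacency check until the nth hit; B enumerates only the valid numbers, building them digit-length by digit-length from each number's allowed successor digits, so it skips all invalid integers.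
import Mathlib
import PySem

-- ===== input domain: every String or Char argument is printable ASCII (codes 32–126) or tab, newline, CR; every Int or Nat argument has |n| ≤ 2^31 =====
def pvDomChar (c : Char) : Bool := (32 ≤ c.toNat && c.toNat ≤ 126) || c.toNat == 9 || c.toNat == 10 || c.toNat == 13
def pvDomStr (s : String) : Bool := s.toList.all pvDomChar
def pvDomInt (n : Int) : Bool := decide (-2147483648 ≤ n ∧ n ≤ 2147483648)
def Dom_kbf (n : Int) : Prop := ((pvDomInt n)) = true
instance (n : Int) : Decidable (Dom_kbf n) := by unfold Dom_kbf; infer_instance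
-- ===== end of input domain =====

-- B replaces A's test-every-integer search by a layer-per-digit-length enumeration of
-- only the valid numbers (objective: faster; measured).

-- ===== PORT A =====
-- ' 1234567890' as code points
def kbLine : List Char := [' ', '1', '2', '3', '4', '5', '6', '7', '8', '9', '0']

-- the body of A's inner for-loop, reading s[x] and s[x+1]
def kbfStep (c c' : Char) : Bool :=
  let k := PySem.Int.mod ((PySem.Int.ofChars? [c]).getD 0 + 9) 10
  PySem.Chars.isIn [c'] (PySem.List.slice kbLine (some k) (some (k + 3)))

-- A's per-number check: the for/else over x in range(len(s)-1) (break ↔ one test fails)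
def kbfValid (i : Nat) : Bool :=
  let s := PySem.Int.toChars (i : Int)   -- str(i), as code points (PySem.Int.toList_toStr)
  (List.range (s.length - 1)).all (fun x => kbfStep (s.getD x ' ') (s.getD (x + 1) ' '))

-- ---- helpers proving termination of A's while-loop (valid numbers are unbounded: 11…1) ----
def rep : Nat → Nat
  | 0 => 0
  | k + 1 => 10 * rep k + 1

lemma rep_ge (k : Nat) : k ≤ rep k := by
  induction k with
  | zero => exact Nat.zero_le _
  | succ k ih =>
    show k + 1 ≤ 10 * rep k + 1
    exact Nat.succ_le_succ (Nat.le_trans ih (Nat.le_mul_of_pos_left _ (by decide)))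

lemma rep_app (n : Nat) (ds : List Char) :
    List.replicate n '1' ++ ('1' :: ds) = List.replicate (n + 1) '1' ++ ds := by
  rw [List.append_cons, ← List.replicate_succ']

lemma toDigitsCore_rep : ∀ (fuel k : Nat) (ds : List Char), k < fuel →
    Nat.toDigitsCore 10 fuel (rep (k + 1)) ds = List.replicate (k + 1) '1' ++ ds := by
  intro fuel
  induction fuel with
  | zero => intro k ds h; exact absurd h (Nat.not_lt_zero k)
  | succ f ih =>
    intro k ds h
    cases k with
    | zero => rfl
    | succ k' =>
      have hd : rep (k' + 2) / 10 = rep (k' + 1) := by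
        rw [show rep (k' + 2) = 10 * rep (k' + 1) + 1 from rfl, Nat.mul_add_div (by decide),
          Nat.div_eq_of_lt (by decide), Nat.add_zero]
      have hm : rep (k' + 2) % 10 = 1 := by
        rw [show rep (k' + 2) = 10 * rep (k' + 1) + 1 from rfl, Nat.mul_add_mod]
      rw [Nat.toDigitsCore]
      simp only [hd, hm]
      rw [if_neg (show rep (k' + 1) ≠ 0 from Nat.succ_ne_zero (10 * rep k'))]
      rw [ih k' _ (Nat.lt_of_succ_lt_succ h)]
      exact rep_app _ _

lemma toChars_rep (k : Nat) :
    PySem.Int.toChars ((rep (k + 1) : Nat) : Int) = List.replicate (k + 1) '1' := by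
  have h : ¬ ((rep (k + 1) : Nat) : Int) < 0 := Int.not_lt.mpr (Int.natCast_nonneg _)
  rw [PySem.Int.toChars, if_neg h, Int.toNat_natCast, Nat.toDigits,
    toDigitsCore_rep (rep (k + 1) + 1) k [] (Nat.lt_succ_of_lt (rep_ge (k + 1))), List.append_nil]

lemma kbfValid_rep (k : Nat) : kbfValid (rep (k + 1)) = true := by
  unfold kbfValid
  rw [toChars_rep]
  show ((List.range ((List.replicate (k + 1) '1').length - 1)).all fun x =>
    kbfStep ((List.replicate (k + 1) '1').getD x ' ')
      ((List.replicate (k + 1) '1').getD (x + 1) ' ')) = true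
  rw [List.length_replicate, Nat.add_sub_cancel, List.all_eq_true]
  intro x hx
  have hxk : x < k := List.mem_range.mp hx
  rw [List.getD_eq_getElem _ _ (by rw [List.length_replicate]; exact Nat.lt_succ_of_lt hxk),
    List.getD_eq_getElem _ _ (by rw [List.length_replicate]; exact Nat.succ_lt_succ hxk),
    List.getElem_replicate, List.getElem_replicate]
  decide

lemma exA (i : Nat) : ∃ m, i < m ∧ kbfValid m = true :=
  ⟨rep (i + 1), Nat.lt_of_lt_of_le (Nat.lt_succ_self i) (rep_ge (i + 1)), kbfValid_rep i⟩

def nvA (i : Nat) : Nat := Nat.find (exA i)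

lemma lt_nvA (i : Nat) : i < nvA i := (Nat.find_spec (exA i)).1

lemma kbfValid_nvA (i : Nat) : kbfValid (nvA i) = true := (Nat.find_spec (exA i)).2

lemma nvA_succ_eq {i : Nat} (h : kbfValid (i + 1) = false) : nvA (i + 1) = nvA i := by
  have h1 := lt_nvA i
  have hv := kbfValid_nvA i
  have h2 : nvA i ≠ i + 1 := by
    intro hc
    rw [hc, h] at hv
    exact Bool.false_ne_true hv
  rw [nvA, Nat.find_eq_iff]
  exact ⟨⟨Nat.lt_of_le_of_ne h1 (fun e => h2 e.symm), hv⟩,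
    fun y hy hc => Nat.find_min (exA i) hy ⟨Nat.lt_of_succ_lt hc.1, hc.2⟩⟩

lemma nvA_gap_lt {i : Nat} (h : kbfValid (i + 1) = false) :
    nvA (i + 1) - (i + 1) < nvA i - i := by
  rw [nvA_succ_eq h]
  exact Nat.sub_lt_sub_left (lt_nvA i) (Nat.lt_succ_self i)

-- while n != 0: i += 1; if the digit check passes: n -= 1
def kbfGo : Nat → Nat → Nat
  | 0, i => i
  | n + 1, i =>
    if h : kbfValid (i + 1) = true then kbfGo n (i + 1) else kbfGo (n + 1) (i + 1)
termination_by n i => (n, nvA i - i)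
decreasing_by
  · exact Prod.Lex.left _ _ (Nat.lt_succ_self n)
  · exact Prod.Lex.right _ (nvA_gap_lt (Bool.eq_false_iff.mpr h))

def kbf (n : Int) : Int := (kbfGo n.toNat 0 : Int)

-- ===== PORT B =====
-- succ[d] = digits allowed after digit d, ascending
def kbfSucc : List (List Nat) :=
  [[0, 9], [1, 2], [1, 2, 3], [2, 3, 4], [3, 4, 5], [4, 5, 6],
   [5, 6, 7], [6, 7, 8], [7, 8, 9], [0, 8, 9]]

-- [(v*10+d, d) for (v, last) in level for d in succ[last]]
def kbfExpand (level : List (Nat × Nat)) : List (Nat × Nat) :=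
  level.flatMap (fun p => (kbfSucc.getD p.2 []).map (fun d => (10 * p.1 + d, d)))

-- while n > len(level): n -= len(level); level = expand(level); return level[n-1][0]
def kbfAltGo (n : Nat) (level : List (Nat × Nat)) : Nat :=
  if hnil : level.length = 0 then 0   -- never reached (levels stay nonempty); termination guard
  else if hlt : level.length < n then kbfAltGo (n - level.length) (kbfExpand level)
  else (level.getD (n - 1) (0, 0)).1
termination_by n
decreasing_by exact Nat.sub_lt (Nat.lt_of_le_of_lt (Nat.zero_le _) hlt) (Nat.pos_of_ne_zero hnil)

def kbf_alt (n : Int) : Int :=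
  if n = 0 then 0
  else (kbfAltGo n.toNat ((List.range 9).map (fun d => (d + 1, d + 1))) : Int)

-- ===== PRECONDITION & SPEC =====
-- A's while-loop never terminates for n < 0 (n is only ever decremented): Pre_ is n ≥ 0.
def Pre_kbf (n : Int) : Prop := 0 ≤ n
instance (n : Int) : Decidable (Pre_kbf n) := by unfold Pre_kbf; infer_instance
def pvWitness_kbf : Int := (3)

def Spec_kbf (n : Int) (out : Int) : Prop := out = kbf_alt n
instance (n : Int) (out : Int) : Decidable (Spec_kbf n out) := by unfold Spec_kbf; infer_instance

-- ===== CLAIM (what is proved, stated in full; the proofs are below) =====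
def Claim_equal_kbf : Prop := ∀ (n : Int), Dom_kbf n → Pre_kbf n → Spec_kbf n (kbf n)

-- ===== LEMMAS AND PROOFS =====

-- keyboard-row adjacency of two digits, closed form (1…9,0 are positions 1…10 in the row)
def okPair (a b : Nat) : Bool :=
  let pa := if a = 0 then 10 else a
  let pb := if b = 0 then 10 else b
  decide (pa ≤ pb + 1 ∧ pb ≤ pa + 1)

-- adjacency check over a digit list, most significant first
def chainN : List Nat → Bool
  | [] => true
  | [_] => true
  | a :: b :: t => okPair a b && chainN (b :: t)

def validN (v : Nat) : Bool := chainN ((Nat.digits 10 v).reverse)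

lemma step_digit : ∀ a, a < 10 → ∀ b, b < 10 →
    kbfStep (Nat.digitChar a) (Nat.digitChar b) = okPair a b := by decide

lemma allRangeChain : ∀ (D : List Nat), (∀ d ∈ D, d < 10) →
    ((List.range ((D.map Nat.digitChar).length - 1)).all (fun x =>
      kbfStep ((D.map Nat.digitChar).getD x ' ') ((D.map Nat.digitChar).getD (x + 1) ' ')))
      = chainN D := by
  intro D
  induction D with
  | nil => intro _; simp [chainN]
  | cons a t ih =>
    intro hD
    cases t with
    | nil => simp [chainN]
    | cons b t' =>
      have ha : a < 10 := hD a (by simp)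
      have hb : b < 10 := hD b (by simp)
      have ih' := ih (fun d hd => hD d (List.mem_cons_of_mem a hd))
      simp only [List.map_cons, List.length_cons, List.length_map] at ih' ⊢
      rw [show t'.length + 1 + 1 - 1 = t'.length + 1 from rfl]
      rw [List.range_succ_eq_map, List.all_cons, List.all_map]
      rw [show t'.length + 1 - 1 = t'.length from rfl] at ih'
      show (kbfStep (Nat.digitChar a) (Nat.digitChar b) &&
        (List.range t'.length).all _) = chainN (a :: b :: t')
      rw [step_digit a ha b hb]
      show (okPair a b && (List.range t'.length).all
        (fun x => kbfStep ((Nat.digitChar b :: t'.map Nat.digitChar).getD x ' ')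
          ((Nat.digitChar b :: t'.map Nat.digitChar).getD (x + 1) ' '))) = _
      rw [ih']
      rfl

lemma toDigitsCore_eq : ∀ (fuel n : Nat) (ds : List Char), 0 < n → n < 10 ^ fuel →
    Nat.toDigitsCore 10 fuel n ds = ((Nat.digits 10 n).map Nat.digitChar).reverse ++ ds := by
  intro fuel
  induction fuel with
  | zero => intro n ds h1 h2; simp at h2; omega
  | succ f ih =>
    intro n ds h1 h2
    rw [Nat.toDigitsCore]
    by_cases h : n / 10 = 0
    · have hlt : n < 10 := by omega
      rw [Nat.digits_def' (by norm_num : (1:Nat) < 10) h1, h]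
      simp [Nat.mod_eq_of_lt hlt]
    · have hp : 0 < n / 10 := Nat.pos_of_ne_zero h
      have hb : n / 10 < 10 ^ f := by
        rw [Nat.div_lt_iff_lt_mul (by norm_num)]
        calc n < 10 ^ (f+1) := h2
        _ = 10 ^ f * 10 := by ring
      simp only [h, if_false]
      rw [ih (n / 10) _ hp hb, Nat.digits_def' (by norm_num : (1:Nat) < 10) h1]
      simp

lemma toChars_eq (n : Nat) (h : 0 < n) :
    PySem.Int.toChars (n : Int) = ((Nat.digits 10 n).map Nat.digitChar).reverse := by
  have hn : ¬ ((n : Int) < 0) := by omega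
  simp only [PySem.Int.toChars, hn, if_false, Int.toNat_natCast]
  rw [Nat.toDigits, toDigitsCore_eq (n+1) n [] h]
  · simp
  · calc n < 10 ^ n := Nat.lt_pow_self (by norm_num)
    _ ≤ 10 ^ (n+1) := Nat.pow_le_pow_right (by norm_num) (by omega)

lemma kbfValid_eq {v : Nat} (h : 1 ≤ v) : kbfValid v = validN v := by
  unfold kbfValid validN
  rw [toChars_eq v h, ← List.map_reverse]
  exact allRangeChain _ (fun d hd => Nat.digits_lt_base (by norm_num) (List.mem_reverse.mp hd))

lemma chainN_append : ∀ (xs : List Nat) (d : Nat) (h : xs ≠ []),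
    chainN (xs ++ [d]) = (chainN xs && okPair (xs.getLast h) d) := by
  intro xs
  induction xs with
  | nil => intro d h; simp at h
  | cons x t ih =>
    intro d h
    cases t with
    | nil => simp [chainN, Bool.and_comm]
    | cons y t' =>
      show chainN (x :: y :: (t' ++ [d])) = _
      have h1 : chainN (x :: y :: (t' ++ [d])) = (okPair x y && chainN (y :: (t' ++ [d]))) := rfl
      have h2 : chainN (x :: y :: t') = (okPair x y && chainN (y :: t')) := rfl
      rw [h1, h2, show y :: (t' ++ [d]) = (y :: t') ++ [d] from rfl,
        ih d (List.cons_ne_nil y t'), List.getLast_cons (List.cons_ne_nil y t'),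
        Bool.and_assoc]

lemma validN_mul_add {v d : Nat} (hv : 1 ≤ v) (hd : d < 10) :
    validN (10 * v + d) = (validN v && okPair (v % 10) d) := by
  have hpos : 0 < 10 * v + d := by omega
  have hd10 : Nat.digits 10 (10 * v + d) = d :: Nat.digits 10 v := by
    rw [Nat.digits_def' (by norm_num : (1:Nat) < 10) hpos, Nat.mul_add_mod,
      Nat.mul_add_div (by norm_num), Nat.mod_eq_of_lt hd, Nat.div_eq_of_lt hd]
    simp
  have hne : Nat.digits 10 v ≠ [] := Nat.digits_ne_nil_iff_ne_zero.mpr (by omega)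
  have hrne : (Nat.digits 10 v).reverse ≠ [] := by simpa using hne
  unfold validN
  rw [hd10, List.reverse_cons, chainN_append _ d hrne]
  have hlast : (Nat.digits 10 v).reverse.getLast hrne = v % 10 := by
    rw [List.getLast_reverse]
    have hh : Nat.digits 10 v = v % 10 :: Nat.digits 10 (v / 10) :=
      Nat.digits_def' (by norm_num) (by omega)
    simp [hh]
  rw [hlast]

lemma kbfValid_mul_add {v d : Nat} (hv : 1 ≤ v) (hd : d < 10) :
    kbfValid (10 * v + d) = (kbfValid v && okPair (v % 10) d) := by
  rw [kbfValid_eq hv, kbfValid_eq (by omega : 1 ≤ 10 * v + d), validN_mul_add hv hd]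

lemma succ_mem : ∀ a, a < 10 → ∀ b, b < 10 → (b ∈ kbfSucc.getD a [] ↔ okPair a b = true) := by
  decide

lemma succ_lt : ∀ a, a < 10 → ∀ d ∈ kbfSucc.getD a [], d < 10 := by decide

lemma succ_pairwise : ∀ a, a < 10 → (kbfSucc.getD a []).Pairwise (· < ·) := by decide

def pairF (v : Nat) : Nat × Nat := (v, v % 10)

def ascValid (k : Nat) : List Nat := (List.range' (10 ^ k) (9 * 10 ^ k)).filter (fun v => kbfValid v)

lemma mem_ascValid {k v : Nat} :
    v ∈ ascValid k ↔ (10 ^ k ≤ v ∧ v < 10 ^ (k + 1) ∧ kbfValid v = true) := by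
  have hps : 10 ^ (k + 1) = 10 ^ k * 10 := pow_succ 10 k
  simp only [ascValid, List.mem_filter, List.mem_range'_1]
  constructor
  · rintro ⟨⟨h1, h2⟩, h3⟩; exact ⟨h1, by omega, h3⟩
  · rintro ⟨h1, h2, h3⟩; exact ⟨⟨h1, by omega⟩, h3⟩

lemma pairwise_ascValid (k : Nat) : (ascValid k).Pairwise (· < ·) :=
  List.Pairwise.sublist List.filter_sublist (List.pairwise_lt_range' 1)

lemma eq_of_sorted_mem {xs ys : List Nat} (hx : xs.Pairwise (· < ·))
    (hy : ys.Pairwise (· < ·)) (hm : ∀ m, m ∈ xs ↔ m ∈ ys) : xs = ys := by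
  refine List.Perm.eq_of_pairwise (le := (· < ·))
    (fun a b _ _ hab hba => by omega) hx hy ?_
  exact (List.perm_ext_iff_of_nodup (hx.imp Nat.ne_of_lt) (hy.imp Nat.ne_of_lt)).mpr hm

lemma expand_map (k : Nat) :
    kbfExpand ((ascValid k).map pairF) = (ascValid (k + 1)).map pairF := by
  have hps1 : 10 ^ (k + 1) = 10 ^ k * 10 := pow_succ 10 k
  have hps2 : 10 ^ (k + 2) = 10 ^ (k + 1) * 10 := pow_succ 10 (k + 1)
  have hk1 : (1 : Nat) ≤ 10 ^ k := Nat.one_le_pow _ _ (by norm_num)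
  have hA : kbfExpand ((ascValid k).map pairF)
      = ((ascValid k).flatMap (fun v => (kbfSucc.getD (v % 10) []).map (fun d => 10 * v + d))).map pairF := by
    unfold kbfExpand
    rw [List.map_flatMap]
    rw [List.flatMap_def, List.flatMap_def, List.map_map]
    congr 1
    apply List.map_congr_left
    intro v _
    simp only [Function.comp]
    rw [List.map_map]
    apply List.map_congr_left
    intro d hd
    have hd10 : d < 10 := succ_lt (v % 10) (Nat.mod_lt _ (by norm_num)) d hd
    simp only [Function.comp, pairF, Nat.mul_add_mod, Nat.mod_eq_of_lt hd10]
  have hB : (ascValid k).flatMap (fun v => (kbfSucc.getD (v % 10) []).map (fun d => 10 * v + d))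
      = ascValid (k + 1) := by
    apply eq_of_sorted_mem
    · rw [List.pairwise_flatMap]
      constructor
      · intro v _
        rw [List.pairwise_map]
        exact (succ_pairwise (v % 10) (Nat.mod_lt _ (by norm_num))).imp (fun h => by omega)
      · refine (pairwise_ascValid k).imp ?_
        intro v w hvw x hx y hy
        rw [List.mem_map] at hx hy
        obtain ⟨d, hd, rfl⟩ := hx
        obtain ⟨e, _, rfl⟩ := hy
        have := succ_lt (v % 10) (Nat.mod_lt _ (by norm_num)) d hd
        omega
    · exact pairwise_ascValid (k + 1)
    · intro m
      rw [List.mem_flatMap]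
      constructor
      · rintro ⟨v, hv, hm⟩
        rw [List.mem_map] at hm
        obtain ⟨d, hd, rfl⟩ := hm
        rw [mem_ascValid] at hv
        obtain ⟨hv1, hv2, hv3⟩ := hv
        have hd10 : d < 10 := succ_lt _ (Nat.mod_lt _ (by norm_num)) d hd
        have hok : okPair (v % 10) d = true :=
          (succ_mem _ (Nat.mod_lt _ (by norm_num)) d hd10).mp hd
        rw [mem_ascValid]
        refine ⟨by omega, by omega, ?_⟩
        rw [kbfValid_mul_add (by omega) hd10, hv3, hok]
        rfl
      · intro hm
        rw [mem_ascValid] at hm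
        obtain ⟨h1, h2, h3⟩ := hm
        have hm10 : m % 10 < 10 := Nat.mod_lt _ (by norm_num)
        have hsplit : 10 * (m / 10) + m % 10 = m := Nat.div_add_mod m 10
        have hq1 : 1 ≤ m / 10 := (Nat.one_le_div_iff (by norm_num)).mpr (by omega)
        have hv : kbfValid (10 * (m / 10) + m % 10)
            = (kbfValid (m / 10) && okPair ((m / 10) % 10) (m % 10)) :=
          kbfValid_mul_add hq1 hm10
        rw [hsplit, h3] at hv
        obtain ⟨hva, hvb⟩ := (Bool.and_eq_true _ _).mp hv.symm
        refine ⟨m / 10, ?_, ?_⟩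
        · rw [mem_ascValid]
          exact ⟨by omega, by omega, hva⟩
        · rw [List.mem_map]
          exact ⟨m % 10,
            (succ_mem ((m / 10) % 10) (Nat.mod_lt _ (by norm_num)) (m % 10) hm10).mpr hvb,
            hsplit⟩
  rw [hA, hB]

lemma K1 : ∀ (l : List Nat), l.Pairwise (· < ·) → ∀ (a b : Nat),
    (∀ m, m ∈ l ↔ (a < m ∧ m ≤ b ∧ kbfValid m = true)) →
    ∀ j, j < l.length → nvA^[j + 1] a = l.getD j 0 := by
  intro l
  induction l with
  | nil => intro _ a b _ j hj; simp at hj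
  | cons x t ih =>
    intro hp a b hm j hj
    have hhead : ∀ y ∈ t, x < y := (List.pairwise_cons.mp hp).1
    have hx := (hm x).mp (List.mem_cons_self ..)
    have hnva : nvA a = x := by
      rw [nvA, Nat.find_eq_iff]
      refine ⟨⟨hx.1, hx.2.2⟩, ?_⟩
      rintro y hy ⟨hy1, hy2⟩
      by_cases hyb : y ≤ b
      · rcases List.mem_cons.mp ((hm y).mpr ⟨hy1, hyb, hy2⟩) with rfl | hyt
        · omega
        · exact absurd (hhead y hyt) (by omega)
      · have : x ≤ b := hx.2.1
        omega
    cases j with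
    | zero => simp [hnva]
    | succ j =>
      rw [Function.iterate_succ_apply, hnva]
      have hm' : ∀ m, m ∈ t ↔ (x < m ∧ m ≤ b ∧ kbfValid m = true) := by
        intro m
        constructor
        · intro hmt
          have := (hm m).mp (List.mem_cons_of_mem _ hmt)
          exact ⟨hhead m hmt, this.2.1, this.2.2⟩
        · rintro ⟨h1, h2, h3⟩
          rcases List.mem_cons.mp ((hm m).mpr ⟨by omega, h2, h3⟩) with rfl | hmem
          · omega
          · exact hmem
      rw [List.getD_cons_succ]
      exact ih (List.pairwise_cons.mp hp).2 x b hm' j (by simpa using hj)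

lemma getD_last_max {l : List Nat} (hp : l.Pairwise (· < ·)) {x : Nat} (hx : x ∈ l) :
    x ≤ l.getD (l.length - 1) 0 := by
  have hlp : 0 < l.length := List.length_pos_of_mem hx
  obtain ⟨i, hi, hxe⟩ := List.getElem_of_mem hx
  rw [List.getD_eq_getElem _ _ (by omega)]
  by_cases hie : i = l.length - 1
  · subst hie
    rw [← hxe]
  · have hlt := List.pairwise_iff_getElem.mp hp i (l.length - 1) hi (by omega) (by omega)
    rw [← hxe]
    exact le_of_lt hlt

lemma nines : ∀ k, kbfValid (10 ^ (k + 1) - 1) = true := by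
  intro k
  induction k with
  | zero => decide
  | succ k ih =>
    have hps : 10 ^ (k + 1) = 10 ^ k * 10 := pow_succ 10 k
    have hps2 : 10 ^ (k + 2) = 10 ^ (k + 1) * 10 := pow_succ 10 (k + 1)
    have hk1 : (1 : Nat) ≤ 10 ^ k := Nat.one_le_pow _ _ (by norm_num)
    rw [show 10 ^ (k + 2) - 1 = 10 * (10 ^ (k + 1) - 1) + 9 by omega,
      kbfValid_mul_add (by omega) (by norm_num), ih,
      show (10 ^ (k + 1) - 1) % 10 = 9 by omega]
    decide

lemma mainB : ∀ n, 1 ≤ n → ∀ k,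
    kbfAltGo n ((ascValid k).map pairF) = nvA^[n] (10 ^ k - 1) := by
  intro n
  induction n using Nat.strong_induction_on with
  | _ n IH =>
    intro hn k
    have hps : 10 ^ (k + 1) = 10 ^ k * 10 := pow_succ 10 k
    have hk1 : (1 : Nat) ≤ 10 ^ k := Nat.one_le_pow _ _ (by norm_num)
    have hpw : (ascValid k).Pairwise (· < ·) := pairwise_ascValid k
    have hbin : 10 ^ (k + 1) - 1 ∈ ascValid k := mem_ascValid.mpr ⟨by omega, by omega, nines k⟩
    have hlen : 0 < (ascValid k).length := List.length_pos_of_mem hbin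
    have hmK : ∀ m, m ∈ ascValid k ↔
        (10 ^ k - 1 < m ∧ m ≤ 10 ^ (k + 1) - 1 ∧ kbfValid m = true) := by
      intro m
      rw [mem_ascValid]
      constructor
      · rintro ⟨h1, h2, h3⟩; exact ⟨by omega, by omega, h3⟩
      · rintro ⟨h1, h2, h3⟩; exact ⟨by omega, by omega, h3⟩
    rw [kbfAltGo]
    simp only [List.length_map]
    rw [dif_neg (by omega)]
    by_cases hcase : (ascValid k).length < n
    · rw [dif_pos hcase, expand_map k, IH (n - (ascValid k).length) (by omega) (by omega) (k + 1)]
      have hiter : nvA^[n] (10 ^ k - 1)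
          = nvA^[n - (ascValid k).length] (nvA^[(ascValid k).length] (10 ^ k - 1)) := by
        rw [← Function.iterate_add_apply, Nat.sub_add_cancel (by omega)]
      have hK := K1 (ascValid k) hpw (10 ^ k - 1) (10 ^ (k + 1) - 1) hmK
        ((ascValid k).length - 1) (by omega)
      rw [Nat.sub_add_cancel hlen] at hK
      have hmem : (ascValid k).getD ((ascValid k).length - 1) 0 ∈ ascValid k := by
        rw [List.getD_eq_getElem _ _ (by omega)]
        exact List.getElem_mem _
      have hmax : (ascValid k).getD ((ascValid k).length - 1) 0 = 10 ^ (k + 1) - 1 :=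
        le_antisymm ((hmK _).mp hmem).2.1 (getD_last_max hpw hbin)
      rw [hiter, hK, hmax]
    · rw [dif_neg hcase]
      have hj : n - 1 < (ascValid k).length := by omega
      rw [List.getD_eq_getElem _ _ (by rw [List.length_map]; omega), List.getElem_map]
      have hK := K1 (ascValid k) hpw (10 ^ k - 1) (10 ^ (k + 1) - 1) hmK (n - 1) hj
      rw [Nat.sub_add_cancel hn] at hK
      rw [hK, List.getD_eq_getElem _ _ hj]
      rfl

lemma nvA_eq_succ {i : Nat} (h : kbfValid (i + 1) = true) : nvA i = i + 1 := by
  rw [nvA, Nat.find_eq_iff]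
  exact ⟨⟨by omega, h⟩, fun y hy hc => by omega⟩

lemma kbfGo_eq : ∀ n i, kbfGo n i = nvA^[n] i := by
  intro n i
  induction n, i using kbfGo.induct with
  | case1 i => simp [kbfGo]
  | case2 n i h ih =>
    rw [kbfGo, dif_pos h, ih, Function.iterate_succ_apply, nvA_eq_succ h]
  | case3 n i h ih =>
    rw [kbfGo, dif_neg h, ih, Function.iterate_succ_apply, Function.iterate_succ_apply,
      nvA_succ_eq (by simpa using h)]

lemma level0_eq : (List.range 9).map (fun d => (d + 1, d + 1)) = (ascValid 0).map pairF := by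
  decide

theorem kbf_spec : Claim_equal_kbf := by
  intro n _ hpre
  unfold Spec_kbf
  rcases eq_or_lt_of_le hpre with h0 | hpos
  · rw [← h0]
    simp [kbf, kbf_alt, kbfGo]
  · have h1 : 1 ≤ n.toNat := by omega
    unfold kbf kbf_alt
    rw [if_neg (by omega), kbfGo_eq, level0_eq, mainB n.toNat h1 0]
    norm_num
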